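-- pv_equiv track=rewrite | github.com/Keyology/interview-prep-code | twitter.py | similiary_score
-- ===== SOURCE A (Python) =====
-- def similiary_score(user_handle, twitter_handles):
--     scores = {} # keep track of a score
--     # create a loop to compare letters in my_handle to letters in each twitter_handle
--     for i in range(len(twitter_handles)):
--         score = 0
--         for letter in user_handle:
--             if letter in twitter_handles[i]:
--                 score += 1  # if we find similar letter, +1 to score
--             else:
--                 score -= 1
--         # add twitter_handle(as key), and score(as value) to scores dictionary
--         scores[twitter_handles[i]] = score
--     return scores
-- ===== SOURCE B (Python) =====
-- def similiary_score(user_handle, twitter_handles):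
--     # Pass 1: frequency table of the user's handle, built once.
--     freq = {}
--     for c in user_handle:
--         freq[c] = freq.get(c, 0) + 1
--     n = len(user_handle)
--     # Pass 2: per handle, sum the user-letter frequencies of the handle's
--     # DISTINCT characters; matches-minus-misses is then 2*matches - n.
--     scores = {}
--     for h in twitter_handles:
--         matches = 0
--         for c in set(h):
--             matches += freq.get(c, 0)
--         scores[h] = 2 * matches - n
--     return scores
-- ===== Notes on version B (the rewrite author's own statement) =====
-- stated objective: faster
-- what changed: B inverts the inner traversal: it builds a frequency counter of user_handle once, then scores each handle by summing those frequencies over the handle's distinct characters (set iteration) with the closed form 2*matches - len(user_handle), instead of A's per-handle rescan of user_handle with a substring test and signed +-1 accumulation.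
import Mathlib
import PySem

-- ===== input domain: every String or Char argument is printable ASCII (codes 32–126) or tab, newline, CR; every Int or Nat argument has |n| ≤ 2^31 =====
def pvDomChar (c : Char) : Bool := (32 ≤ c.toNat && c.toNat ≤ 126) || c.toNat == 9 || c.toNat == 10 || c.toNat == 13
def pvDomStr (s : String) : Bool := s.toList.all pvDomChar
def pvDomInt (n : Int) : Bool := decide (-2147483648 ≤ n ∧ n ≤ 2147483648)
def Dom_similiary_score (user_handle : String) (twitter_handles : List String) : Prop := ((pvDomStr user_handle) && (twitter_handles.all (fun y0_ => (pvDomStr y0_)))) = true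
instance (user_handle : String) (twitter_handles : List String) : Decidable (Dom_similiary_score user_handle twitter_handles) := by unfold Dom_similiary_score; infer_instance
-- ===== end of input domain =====

-- B builds a frequency counter of user_handle once and scores each handle by summing those
-- frequencies over the handle's distinct characters (2*matches - n), replacing A's per-handle
-- rescan of user_handle with signed +-1 accumulation; equivalence is about the return value.
-- ===== PORT A =====
def similiary_score (user_handle : String) (twitter_handles : List String) : List (String × Int) :=
  -- twitter_handles[i] (always in range for i in range(len(..))); 'letter in ..' is a 1-char substring test
  ((PySem.List.pyRange 0 (PySem.List.len twitter_handles)).foldl (fun scores i =>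
    PySem.Dict.insert scores (PySem.List.pyGetD twitter_handles i "")
      (user_handle.toList.foldl (fun score letter =>
        if PySem.Chars.isIn [letter] (PySem.List.pyGetD twitter_handles i "").toList
        then score + 1 else score - 1) (0 : Int))) PySem.Dict.empty).items

-- ===== PORT B =====
def similiary_score_alt (user_handle : String) (twitter_handles : List String) : List (String × Int) :=
  -- pass 1: freq = {} ; for c in user_handle: freq[c] = freq.get(c, 0) + 1
  let freq : PySem.Dict Char Int :=
    user_handle.toList.foldl (fun d c => d.insert c (d.getD c 0 + 1)) PySem.Dict.empty
  let n : Int := PySem.Str.len user_handle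
  -- pass 2: for h in handles: matches = sum of freq.get(c, 0) over set(h); scores[h] = 2*matches - n
  (twitter_handles.foldl (fun scores h =>
    PySem.Dict.insert scores h
      (2 * ((PySem.Set.ofList h.toList).foldl (fun m c => m + freq.getD c 0) 0) - n))
    PySem.Dict.empty).items

-- ===== PRECONDITION & SPEC =====
def Spec_similiary_score (user_handle : String) (twitter_handles : List String) (out : List (String × Int)) : Prop := out = similiary_score_alt user_handle twitter_handles
instance (user_handle : String) (twitter_handles : List String) (out : List (String × Int)) : Decidable (Spec_similiary_score user_handle twitter_handles out) := by unfold Spec_similiary_score; infer_instance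

-- ===== CLAIM (what is proved, stated in full; the proofs are below) =====
def Claim_equal_similiary_score : Prop := ∀ (user_handle : String) (twitter_handles : List String), Dom_similiary_score user_handle twitter_handles → Spec_similiary_score user_handle twitter_handles (similiary_score user_handle twitter_handles)

-- ===== LEMMAS AND PROOFS =====
-- B's counter lookup is the character count of user_handle
theorem freq_getD (u : List Char) (c : Char) :
    (u.foldl (fun d c => d.insert c (d.getD c 0 + 1)) PySem.Dict.empty).getD c 0
      = (u.count c : Int) := by
  rw [PySem.Dict.getD_foldl_insert_add_one]
  simp

-- casting a mapped Nat sum to Int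
theorem sum_map_cast (S : List Char) (f : Char → Nat) :
    (S.map (fun c => (f c : Int))).sum = ((S.map f).sum : Int) := by
  induction S with
  | nil => simp
  | cons s rest ih => simp [ih]

-- on a Nodup list the 0/1-indicator of x sums to membership
theorem sum_indicator (x : Char) (S : List Char) (hS : S.Nodup) :
    (S.map (fun c => (if x = c then 1 else 0 : Nat))).sum = if x ∈ S then 1 else 0 := by
  induction S with
  | nil => simp
  | cons s rest ihS =>
    simp only [List.nodup_cons] at hS
    simp only [List.map_cons, List.sum_cons, ihS hS.2, List.mem_cons]
    by_cases hxs : x = s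
    · subst hxs
      simp [fun hm => hS.1 hm]
    · simp [hxs]

-- summing char-counts of u over a Nodup list S counts u's letters that lie in S
theorem sum_counts_eq_countP (u : List Char) (S : List Char) (hS : S.Nodup) :
    (S.map (fun c => u.count c)).sum = u.countP (fun l => decide (l ∈ S)) := by
  induction u with
  | nil => simp
  | cons x t ih =>
    simp only [List.count_cons, List.countP_cons, List.sum_map_add, ih]
    simp [sum_indicator x S hS]

-- per-occurrence +-1 over u equals 0 + 2*matches - len(u) in closed form
theorem fold_pm (u : List Char) (h : List Char) (a : Int) :
    u.foldl (fun score letter =>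
      if PySem.Chars.isIn [letter] h then score + 1 else score - 1) a
    = a + 2 * (u.countP (fun l => decide (l ∈ h)) : Int) - u.length := by
  induction u generalizing a with
  | nil => simp
  | cons c t ih =>
    have hc : PySem.Chars.isIn [c] h = decide (c ∈ h) := by
      by_cases hm : c ∈ h
      · simp [PySem.Chars.isIn_iff_infix, List.singleton_infix_iff, hm]
      · simp [PySem.Chars.isIn_eq_false_iff, List.singleton_infix_iff, hm]
    simp only [List.foldl_cons, List.countP_cons, List.length_cons, hc]
    by_cases hm : c ∈ h <;>
      simp only [hm, decide_true, decide_false, if_true, ih] <;>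
      push_cast <;> ring

-- per handle: A's signed +-1 accumulation from 0 equals 2*matches - len, where matches
-- sums u's character counts over the handle's distinct characters
theorem score_closed_form (u : List Char) (h : List Char) :
    u.foldl (fun score letter =>
      if PySem.Chars.isIn [letter] h then score + 1 else score - 1) (0 : Int)
    = 2 * ((PySem.Set.ofList h).foldl
        (fun m c => m + (u.count c : Int)) 0) - u.length := by
  have hsum : (PySem.Set.ofList h).foldl (fun m c => m + (u.count c : Int)) 0
      = (u.countP (fun l => decide (l ∈ h)) : Int) := by
    rw [PySem.List.foldl_add, sum_map_cast,
        sum_counts_eq_countP u _ (PySem.Set.nodup_ofList h), zero_add]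
    congr 1
    apply List.countP_congr
    intro l _
    simp [PySem.Set.mem_ofList]
  rw [hsum, fold_pm]
  ring

-- the two dict-building loops produce the same dict: the fold functions are pointwise equal
theorem folds_agree (u : String) (twitter_handles : List String)
    (scores : PySem.Dict String Int) :
    twitter_handles.foldl (fun scores h =>
      PySem.Dict.insert scores h (u.toList.foldl (fun score letter =>
        if PySem.Chars.isIn [letter] h.toList then score + 1 else score - 1) (0 : Int))) scores
    = twitter_handles.foldl (fun scores h =>
        PySem.Dict.insert scores h
          (2 * ((PySem.Set.ofList h.toList).foldl
              (fun m c => m + (u.toList.foldl (fun d c => d.insert c (d.getD c 0 + 1))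
                PySem.Dict.empty).getD c 0) 0)
            - PySem.Str.len u)) scores := by
  have hfreq : ∀ h : String, (fun (m : Int) (c : Char) =>
      m + (u.toList.foldl (fun d c => d.insert c (d.getD c 0 + 1))
        PySem.Dict.empty).getD c 0)
      = fun m c => m + (u.toList.count c : Int) := by
    intro _; funext m c; rw [freq_getD]
  congr 1
  funext scores h
  rw [hfreq h, score_closed_form, PySem.Str.len_eq]

-- ===== VERDICT (by name: the statement is the Claim_ definition above) =====
theorem similiary_score_spec : Claim_equal_similiary_score := by
  intro u ths _
  unfold Spec_similiary_score similiary_score similiary_score_alt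
  rw [PySem.List.foldl_pyRange_pyGetD ths ""
      (fun scores h => PySem.Dict.insert scores h
        (u.toList.foldl (fun score letter =>
          if PySem.Chars.isIn [letter] h.toList then score + 1 else score - 1) (0 : Int)))
      PySem.Dict.empty (le_refl 0)]
  simp only [Int.toNat_zero, List.drop_zero]
  exact congrArg PySem.Dict.items (folds_agree u ths PySem.Dict.empty)
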